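-- pv_equiv track=rewrite | github.com/Kjili/storythreads | story_threads.py | thread_is_closed
-- ===== SOURCE A (Python) =====
-- from enum import Enum
--
-- class EVENT(str, Enum):
-- 	"""
-- 	Define the events of the story thread.
-- 	"""
-- 	OPENING = "open"
-- 	CLOSING = "close"
-- 	DEVELOPMENT = "develop"
--
-- def thread_is_closed(thread_list, thread_id):
-- 	"""
-- 	Find out if a given thread has been closed.
--
-- 	A non-existing thread is not closed.
--
-- 	Args:
-- 		thread_list: The list of dictionaries that represent story
-- 			threads.
-- 		thread_id: The id/name of the thread to check.
--
-- 	Return: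
-- 		Boolean: True, if the thread exists and has been closed, else
-- 			False
-- 	"""
-- 	if thread_id not in [next(iter(el.keys())) for el in thread_list]:
-- 		return False
-- 	thread_ids = [next(iter(el.keys())) for el in thread_list]
-- 	index_last_entry = len(thread_ids) - 1 - list(reversed(thread_ids)).index(thread_id)
-- 	if thread_list[index_last_entry][thread_id]["event"] == EVENT.CLOSING:
-- 		return True
-- 	return False
-- ===== SOURCE B (Python) =====
-- from enum import Enum
--
-- class EVENT(str, Enum):
-- 	"""
-- 	Define the events of the story thread.
-- 	"""
-- 	OPENING = "open"
-- 	CLOSING = "close"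
-- 	DEVELOPMENT = "develop"
--
-- def thread_is_closed(thread_list, thread_id):
-- 	"""
-- 	Find out if a given thread has been closed.
--
-- 	A non-existing thread is not closed.
--
-- 	Single reverse scan: the first matching entry seen from the back is
-- 	the thread's last event.
-- 	"""
-- 	for el in reversed(thread_list):
-- 		if next(iter(el.keys())) == thread_id:
-- 			return el[thread_id]["event"] == EVENT.CLOSING
-- 	return False
-- ===== Notes on version B (the rewrite author's own statement) =====
-- stated objective: simpler
-- what changed: One reverse scan that returns at the last matching entry, replacing A's membership test over a rebuilt key list, reversed().index lookup and index-back-into-list arithmetic.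
import Mathlib
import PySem

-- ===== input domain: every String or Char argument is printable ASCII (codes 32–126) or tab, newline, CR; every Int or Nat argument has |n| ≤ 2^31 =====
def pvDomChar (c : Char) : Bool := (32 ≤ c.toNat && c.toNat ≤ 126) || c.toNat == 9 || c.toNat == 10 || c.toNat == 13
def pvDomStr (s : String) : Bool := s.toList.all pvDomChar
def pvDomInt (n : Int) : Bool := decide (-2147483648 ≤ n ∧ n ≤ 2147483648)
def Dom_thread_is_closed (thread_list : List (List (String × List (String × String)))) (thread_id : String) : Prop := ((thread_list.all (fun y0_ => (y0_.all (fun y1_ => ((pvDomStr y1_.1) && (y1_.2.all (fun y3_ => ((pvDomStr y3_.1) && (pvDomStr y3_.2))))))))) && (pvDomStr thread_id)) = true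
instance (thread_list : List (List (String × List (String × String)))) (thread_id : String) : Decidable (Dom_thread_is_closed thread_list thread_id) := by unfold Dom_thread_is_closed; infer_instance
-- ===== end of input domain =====

-- B replaces A's three passes (key comprehension + membership test, reversed().index,
-- index back into the list) by one reverse scan returning at the last matching entry (simpler).

-- ===== PORT A =====
-- next(iter(el.keys())) : the first key of the dict (dicts arrive as assoc lists; Python's
-- dict keeps the FIRST position of a duplicated key, which Dict.ofList models exactly).
def pvFirstKey (el : List (String × List (String × String))) : String :=
  (PySem.Dict.keys (PySem.Dict.ofList el)).headD ""

-- el[thread_id]["event"] == EVENT.CLOSING  (dict lookups via Dict.ofList: duplicate keys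
-- overwrite as in Python; the getD defaults are unreachable under Pre_).
def pvEventClose (el : List (String × List (String × String))) (tid : String) : Bool :=
  ((PySem.Dict.ofList (((PySem.Dict.ofList el).get? tid).getD [])).get? "event").getD "" == "close"

-- The key comprehension is recomputed inline exactly where Python recomputes thread_ids;
-- list(reversed(thread_ids)).index(thread_id) is guarded by the membership test, so the
-- 'getD 0' default is unreachable.
def thread_is_closed (thread_list : List (List (String × List (String × String)))) (thread_id : String) : Bool :=
  if !((thread_list.map (fun el => pvFirstKey el)).contains thread_id) then false
  else
    if pvEventClose ((PySem.List.pyGet? thread_list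
        (PySem.List.len (thread_list.map (fun el => pvFirstKey el)) - 1 -
          ((PySem.List.index? (thread_list.map (fun el => pvFirstKey el)).reverse thread_id).getD 0 : Nat))).getD [])
        thread_id then true
    else false

-- ===== PORT B =====
-- for el in reversed(thread_list): the first match from the back decides
def pvScanRev : List (List (String × List (String × String))) → String → Bool
  | [], _ => false
  | el :: rest, tid => if pvFirstKey el == tid then pvEventClose el tid else pvScanRev rest tid

def thread_is_closed_alt (thread_list : List (List (String × List (String × String)))) (thread_id : String) : Bool :=
  pvScanRev thread_list.reverse thread_id

-- ===== PRECONDITION & SPEC =====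
-- Pre_ excludes exactly the inputs on which Python A raises: a thread_list containing an
-- empty dict (next(iter({}.keys())) raises StopIteration), or one whose LAST entry keyed
-- by thread_id carries no "event" key (KeyError).
def Pre_thread_is_closed (thread_list : List (List (String × List (String × String)))) (thread_id : String) : Prop :=
  (∀ el ∈ thread_list, el ≠ []) ∧
  (∀ el, (thread_list.filter (fun el => (el.headD ("", [])).1 == thread_id)).getLast? = some el →
    (((PySem.Dict.ofList el).get? thread_id).getD []).any (fun p => p.1 == "event") = true)
instance (thread_list : List (List (String × List (String × String)))) (thread_id : String) : Decidable (Pre_thread_is_closed thread_list thread_id) := by unfold Pre_thread_is_closed; infer_instance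

def pvWitness_thread_is_closed : (List (List (String × List (String × String)))) × String :=
  ([[("t", [("event", "close")])], [("u", [("event", "open")])]], "t")

def Spec_thread_is_closed (thread_list : List (List (String × List (String × String)))) (thread_id : String) (out : Bool) : Prop := out = thread_is_closed_alt thread_list thread_id
instance (thread_list : List (List (String × List (String × String)))) (thread_id : String) (out : Bool) : Decidable (Spec_thread_is_closed thread_list thread_id out) := by unfold Spec_thread_is_closed; infer_instance

-- ===== CLAIM (what is proved, stated in full; the proofs are below) =====
def Claim_equal_thread_is_closed : Prop := ∀ (thread_list : List (List (String × List (String × String)))) (thread_id : String), Dom_thread_is_closed thread_list thread_id → Pre_thread_is_closed thread_list thread_id → Spec_thread_is_closed thread_list thread_id (thread_is_closed thread_list thread_id)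

-- ===== LEMMAS AND PROOFS =====

-- A on rest.reverse ++ [el]: the last element decides if its first key matches, else A
-- computes the same last-match index in rest.reverse and ignores el.
lemma thread_is_closed_append (rest : List (List (String × List (String × String))))
    (el : List (String × List (String × String))) (tid : String) :
    thread_is_closed (rest.reverse ++ [el]) tid =
      if pvFirstKey el == tid then pvEventClose el tid
      else thread_is_closed rest.reverse tid := by
  have hrev : ((rest.reverse ++ [el]).map (fun el => pvFirstKey el)).reverse
      = pvFirstKey el :: rest.map (fun el => pvFirstKey el) := by
    simp [List.map_reverse]
  have hrev' : ((rest.reverse).map (fun el => pvFirstKey el)).reverse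
      = rest.map (fun el => pvFirstKey el) := by simp [List.map_reverse]
  unfold thread_is_closed
  rw [hrev, hrev']
  by_cases h : pvFirstKey el = tid
  · subst h
    rw [PySem.List.index?_cons_self]
    have hlen : (PySem.List.len ((rest.reverse ++ [el]).map fun el => pvFirstKey el) - 1
        - (((some (0:Nat)).getD 0 : Nat) : Int)) = ((rest.reverse.length : Nat) : Int) := by
      simp [PySem.List.len_eq]
    rw [hlen, PySem.List.pyGet?_append_length]
    simp
  · rw [PySem.List.index?_cons_of_ne _ h]
    have hne : (pvFirstKey el == tid) = false := by simp [h]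
    by_cases hm : tid ∈ rest.map (fun el => pvFirstKey el)
    · obtain ⟨j, hj⟩ := Option.isSome_iff_exists.1 ((PySem.List.index?_isSome_iff _ _).2 hm)
      have hjlt : j < rest.length := by
        obtain ⟨pre, suf, hsplit, hlenp, -⟩ := (PySem.List.index?_eq_some_iff _ _ _).1 hj
        have := congrArg List.length hsplit
        simp at this; omega
      have hcont : ((rest.reverse ++ [el]).map fun el => pvFirstKey el).contains tid = true := by
        simp [hne, List.mem_reverse]; exact Or.inl (by simpa using hm)
      have hcont' : ((rest.reverse).map fun el => pvFirstKey el).contains tid = true := by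
        simp [List.mem_reverse]; exact (by simpa using hm)
      rw [hj, hcont, hcont']
      simp only [Option.map_some, Option.getD_some, PySem.List.len_eq, List.length_map,
        List.length_append, List.length_reverse, List.length_cons, List.length_nil,
        Bool.not_true, Bool.false_eq_true, if_false]
      have hidx1 : ((rest.length + 1 : Nat) : Int) - 1 - ((j + 1 : Nat) : Int)
          = ((rest.length - 1 - j : Nat) : Int) := by push_cast [hjlt]; omega
      have hidx2 : ((rest.length : Nat) : Int) - 1 - ((j : Nat) : Int)
          = ((rest.length - 1 - j : Nat) : Int) := by push_cast [hjlt]; omega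
      rw [hidx1, hidx2, PySem.List.pyGet?_natCast, PySem.List.pyGet?_natCast,
        List.getElem?_append_left (by simp; omega : rest.length - 1 - j < rest.reverse.length)]
      simp [hne]
    · have hcont : ((rest.reverse ++ [el]).map fun el => pvFirstKey el).contains tid = false := by
        simp only [List.contains_eq_any_beq, List.any_eq_false]
        intro k hk
        simp only [List.map_append, List.mem_append, List.map_cons, List.map_nil,
          List.mem_singleton, List.mem_map, List.mem_reverse] at hk
        rcases hk with ⟨x, hx, hfx⟩ | rfl
        · intro hbe
          exact hm (by rw [beq_iff_eq.1 hbe, ← hfx]; exact List.mem_map_of_mem hx)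
        · intro hbe
          exact h (beq_iff_eq.1 hbe).symm
      have hcont' : ((rest.reverse).map fun el => pvFirstKey el).contains tid = false := by
        simp only [List.contains_eq_any_beq, List.any_eq_false]
        intro k hk
        simp only [List.mem_map, List.mem_reverse] at hk
        rcases hk with ⟨x, hx, hfx⟩
        intro hbe
        exact hm (by rw [beq_iff_eq.1 hbe, ← hfx]; exact List.mem_map_of_mem hx)
      rw [hcont, hcont']
      simp [hne]

lemma thread_is_closed_rev (r : List (List (String × List (String × String)))) (tid : String) :
    thread_is_closed r.reverse tid = pvScanRev r tid := by
  induction r with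
  | nil => rfl
  | cons el rest ih =>
    rw [List.reverse_cons, thread_is_closed_append, pvScanRev, ih]

-- ===== VERDICT (by name: the statement is the Claim_ definition above) =====
theorem thread_is_closed_spec : Claim_equal_thread_is_closed := by
  intro tl tid _ _
  unfold Spec_thread_is_closed thread_is_closed_alt
  rw [← thread_is_closed_rev tl.reverse tid, List.reverse_reverse]
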